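-- pv_equiv track=rewrite | github.com/RandyAnanda2003/belajarPyMSIB | assignment2-petualangan/petualangan_module.py | countScoreInventory
-- ===== SOURCE A (Python) =====
-- def countScoreInventory(inventory_list) :
--     sum_score = 0
--     buku_nilai = {
--     "pisau" : 10,
--     "kompas" : 20,
--     "rakit" : 30,
--     "pisang" : 2,
--     "anggur" : 8,
--     "kurma" : 5
--     }
--     for barang in inventory_list :
--         if barang in buku_nilai :
--             sum_score += buku_nilai[barang]
--
--     return sum_score
-- ===== SOURCE B (Python) =====
-- def countScoreInventory(inventory_list):
--     buku_nilai = {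
--         "pisau": 10,
--         "kompas": 20,
--         "rakit": 30,
--         "pisang": 2,
--         "anggur": 8,
--         "kurma": 5
--     }
--     sum_score = 0
--     for barang, nilai in buku_nilai.items():
--         sum_score += nilai * inventory_list.count(barang)
--     return sum_score
-- ===== Notes on version B (the rewrite author's own statement) =====
-- stated objective: alternative
-- what changed: B loops over the six scoring keys and adds score * inventory_list.count(key) per key, instead of A's single pass over the inventory with a dict-membership test per item.
import Mathlib
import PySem

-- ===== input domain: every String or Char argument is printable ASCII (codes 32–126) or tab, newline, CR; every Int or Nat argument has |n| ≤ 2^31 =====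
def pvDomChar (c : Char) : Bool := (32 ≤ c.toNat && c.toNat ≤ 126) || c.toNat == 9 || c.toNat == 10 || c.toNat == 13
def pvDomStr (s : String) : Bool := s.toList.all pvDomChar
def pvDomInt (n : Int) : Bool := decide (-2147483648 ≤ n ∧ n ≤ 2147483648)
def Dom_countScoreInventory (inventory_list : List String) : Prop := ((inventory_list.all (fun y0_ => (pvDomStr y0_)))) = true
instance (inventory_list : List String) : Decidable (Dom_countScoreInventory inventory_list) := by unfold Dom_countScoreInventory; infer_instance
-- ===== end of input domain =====

-- B changes the loop target: it iterates over the six scoring keys, adding score * count(key),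
-- instead of A's single pass over the inventory with a per-item dict lookup (alternative decomposition, same cost).

-- ===== PORT A =====
-- the literal dict of A / B (same module constant in both Pythons)
def bukuNilai : PySem.Dict String Int :=
  PySem.Dict.ofList [("pisau", 10), ("kompas", 20), ("rakit", 30), ("pisang", 2), ("anggur", 8), ("kurma", 5)]

def countScoreInventory (inventory_list : List String) : Int :=
  -- 'sum_score += buku_nilai[barang]' runs only under 'barang in buku_nilai', so getD 0 is exact here
  inventory_list.foldl
    (fun sum_score barang =>
      if bukuNilai.contains barang then sum_score + bukuNilai.getD barang 0 else sum_score) 0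

-- ===== PORT B =====
def countScoreInventory_alt (inventory_list : List String) : Int :=
  bukuNilai.items.foldl
    (fun sum_score kv => sum_score + kv.2 * (PySem.List.count inventory_list kv.1)) 0

-- ===== PRECONDITION & SPEC =====
def Spec_countScoreInventory (inventory_list : List String) (out : Int) : Prop := out = countScoreInventory_alt inventory_list
instance (inventory_list : List String) (out : Int) : Decidable (Spec_countScoreInventory inventory_list out) := by unfold Spec_countScoreInventory; infer_instance

-- ===== CLAIM (what is proved, stated in full; the proofs are below) =====
def Claim_equal_countScoreInventory : Prop := ∀ (inventory_list : List String), Dom_countScoreInventory inventory_list → Spec_countScoreInventory inventory_list (countScoreInventory inventory_list)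

-- ===== LEMMAS AND PROOFS =====

theorem bukuNilai_mk : bukuNilai = PySem.Dict.mk
    [("pisau", 10), ("kompas", 20), ("rakit", 30), ("pisang", 2), ("anggur", 8), ("kurma", 5)] := by
  decide

theorem alt_cons (x : String) (xs : List String) :
    countScoreInventory_alt (x :: xs) =
      countScoreInventory_alt xs +
        (if bukuNilai.contains x then bukuNilai.getD x 0 else 0) := by
  simp only [countScoreInventory_alt, bukuNilai_mk, PySem.List.count, List.count_cons,
    PySem.Dict.contains_mk, PySem.Dict.getD_eq_get?_getD, List.foldl, List.any]
  by_cases h1 : x = "pisau" <;> by_cases h2 : x = "kompas" <;> by_cases h3 : x = "rakit" <;>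
    by_cases h4 : x = "pisang" <;> by_cases h5 : x = "anggur" <;> by_cases h6 : x = "kurma" <;>
    simp_all [PySem.Dict.get?_mk_cons] <;> try omega
  intro hc
  rcases hc with h | h | h | h | h | h <;> simp_all

theorem key_lemma (xs : List String) (acc : Int) :
    xs.foldl
      (fun sum_score barang =>
        if bukuNilai.contains barang then sum_score + bukuNilai.getD barang 0 else sum_score) acc
      = acc + countScoreInventory_alt xs := by
  induction xs generalizing acc with
  | nil => simp [countScoreInventory_alt, bukuNilai]
  | cons x xs ih =>
    simp only [List.foldl, ih, alt_cons]
    split_ifs <;> ring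

-- ===== VERDICT (by name: the statement is the Claim_ definition above) =====
theorem countScoreInventory_spec : Claim_equal_countScoreInventory := by
  intro xs _
  show countScoreInventory xs = countScoreInventory_alt xs
  simpa using key_lemma xs 0
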